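-- pv_equiv track=rewrite | github.com/seqeralabs/docs | platform-cloud/docs/cli/scripts/extract-overlays.py | extract_subsections
-- ===== SOURCE A (Python) =====
-- def extract_subsections(section_content):
--     """Extract subsections (### operations) from a command section."""
--     subsections = {}
--     current_subsection = None
--     current_content = []
--
--     lines = section_content.split('\n')
--
--     for line in lines:
--         # Match ### heading (operation)
--         if line.startswith('### '):
--             # Save previous subsection
--             if current_subsection:
--                 subsections[current_subsection] = '\n'.join(current_content)
--
--             # Start new subsection
--             current_subsection = line[4:].strip()
--             current_content = []
--         else:
--             if current_subsection:
--                 current_content.append(line)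
--
--     # Save last subsection
--     if current_subsection:
--         subsections[current_subsection] = '\n'.join(current_content)
--
--     return subsections
-- ===== SOURCE B (Python) =====
-- def extract_subsections(section_content):
--     """Extract subsections (### operations) from a command section."""
--     lines = section_content.split('\n')
--     heads = [(i, line) for i, line in enumerate(lines) if line.startswith('### ')]
--     subsections = {}
--     for j, (idx, line) in enumerate(heads):
--         title = line[4:].strip()
--         if title:
--             end = heads[j + 1][0] if j + 1 < len(heads) else len(lines)
--             subsections[title] = '\n'.join(lines[idx + 1:end])
--     return subsections
-- ===== Notes on version B (the rewrite author's own statement) =====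
-- stated objective: alternative
-- what changed: B first collects all heading positions (lines starting a subsection) with enumerate, then slices the content between consecutive headings, instead of A's stateful line-by-line accumulator with save-on-next-heading.
import Mathlib
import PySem

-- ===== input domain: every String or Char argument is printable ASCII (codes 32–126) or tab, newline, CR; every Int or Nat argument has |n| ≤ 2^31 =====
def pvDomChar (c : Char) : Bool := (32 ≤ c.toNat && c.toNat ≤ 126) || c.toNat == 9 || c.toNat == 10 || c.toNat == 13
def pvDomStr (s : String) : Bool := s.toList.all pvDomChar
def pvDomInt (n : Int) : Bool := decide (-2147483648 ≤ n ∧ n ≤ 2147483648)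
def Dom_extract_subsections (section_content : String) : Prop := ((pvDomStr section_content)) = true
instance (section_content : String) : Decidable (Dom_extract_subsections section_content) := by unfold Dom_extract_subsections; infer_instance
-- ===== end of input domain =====

-- B computes all heading positions in one pass, then slices the content between
-- consecutive headings, instead of A's line-by-line accumulator; objective: alternative.

-- ===== PORT A =====
-- A's loop body; Python's 'current_subsection = None' and the empty stripped title are both
-- falsy in 'if current_subsection:', so the state models both uniformly as the empty string "".
def pvStepA (st : PySem.Dict String String × String × List String) (line : String) :
    PySem.Dict String String × String × List String :=
  if PySem.Str.startswith line "### " then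
    ((if st.2.1 ≠ "" then st.1.insert st.2.1 (PySem.Str.join "\n" st.2.2) else st.1),
     PySem.Str.strip (PySem.Str.slice line (some 4) none), [])
  else
    (st.1, st.2.1, if st.2.1 ≠ "" then st.2.2 ++ [line] else st.2.2)

def extract_subsections (section_content : String) : List (String × String) :=
  let lines := (PySem.Str.split? section_content "\n").getD []
  let st := lines.foldl pvStepA (PySem.Dict.empty, "", [])
  (if st.2.1 ≠ "" then st.1.insert st.2.1 (PySem.Str.join "\n" st.2.2) else st.1).items

-- ===== PORT B =====
-- B's loop body (p = (j, (idx, line)) from enumerate(heads)).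
def pvStepB (lines : List String) (heads : List (Int × String))
    (subs : PySem.Dict String String) (p : Int × Int × String) : PySem.Dict String String :=
  let title := PySem.Str.strip (PySem.Str.slice p.2.2 (some 4) none)
  if title ≠ "" then
    let stop : Int :=
      if p.1 + 1 < PySem.List.len heads then (PySem.List.pyGetD heads (p.1 + 1) (0, "")).1
      else PySem.List.len lines
    subs.insert title (PySem.Str.join "\n" (PySem.List.slice lines (some (p.2.1 + 1)) (some stop)))
  else subs

def extract_subsections_alt (section_content : String) : List (String × String) :=
  let lines := (PySem.Str.split? section_content "\n").getD []
  let heads := (PySem.List.enumerate lines).filter (fun p => PySem.Str.startswith p.2 "### ")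
  ((PySem.List.enumerate heads).foldl (pvStepB lines heads) PySem.Dict.empty).items

-- ===== PRECONDITION & SPEC =====
def Spec_extract_subsections (section_content : String) (out : List (String × String)) : Prop := out = extract_subsections_alt section_content
instance (section_content : String) (out : List (String × String)) : Decidable (Spec_extract_subsections section_content out) := by unfold Spec_extract_subsections; infer_instance

-- ===== CLAIM (what is proved, stated in full; the proofs are below) =====
def Claim_equal_extract_subsections : Prop := ∀ (section_content : String), Dom_extract_subsections section_content → Spec_extract_subsections section_content (extract_subsections section_content)

-- ===== LEMMAS AND PROOFS =====

def pvIsHead (l : String) : Bool := PySem.Str.startswith l "### "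

def pvTitle (l : String) : String := PySem.Str.strip (PySem.Str.slice l (some 4) none)

-- segments of a line list: (list of (title, body-lines) per heading, lines before the first heading)
def pvSeg : List String → List (String × List String) × List String
  | [] => ([], [])
  | l :: ls =>
    let r := pvSeg ls
    if pvIsHead l then ((pvTitle l, r.2) :: r.1, []) else (r.1, l :: r.2)

def pvSave (subs : PySem.Dict String String) (t : String) (b : List String) : PySem.Dict String String :=
  if t ≠ "" then subs.insert t (PySem.Str.join "\n" b) else subs

def pvFoldSave (segs : List (String × List String)) (subs : PySem.Dict String String) : PySem.Dict String String :=
  segs.foldl (fun d p => pvSave d p.1 p.2) subs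

def pvHeads (ls : List String) (s : Int) : List (Int × String) :=
  (PySem.List.enumerate ls s).filter (fun p => pvIsHead p.2)

def pvFirstOf (hs : List (Int × String)) (L : Int) : Int :=
  match hs with
  | [] => L
  | h :: _ => h.1

def pvNexts : List (Int × String) → Int → List ((Int × String) × Int)
  | [], _ => []
  | h :: t, L => (h, pvFirstOf t L) :: pvNexts t L

def pvStop (heads : List (Int × String)) (L : Int) (j : Int) : Int :=
  if j + 1 < PySem.List.len heads then (PySem.List.pyGetD heads (j + 1) (0, "")).1 else L

lemma pvTakeLen {α : Type} (p : α → Bool) (ls : List α) :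
    ls.take (ls.takeWhile p).length = ls.takeWhile p := by
  induction ls with
  | nil => simp
  | cons a as ih =>
    by_cases ha : p a = true
    · rw [List.takeWhile_cons_of_pos ha, List.length_cons, List.take_succ_cons, ih]
    · rw [List.takeWhile_cons_of_neg (by simpa using ha)]
      simp

-- A's fold, characterised by the segments
lemma pvMainA (ls : List String) : ∀ (cur : String) (content : List String)
    (subs : PySem.Dict String String),
    (let st := ls.foldl pvStepA (subs, cur, content);
     if st.2.1 ≠ "" then st.1.insert st.2.1 (PySem.Str.join "\n" st.2.2) else st.1)
    = pvFoldSave (if cur ≠ "" then (cur, content ++ (pvSeg ls).2) :: (pvSeg ls).1 else (pvSeg ls).1) subs := by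
  induction ls with
  | nil =>
    intro cur content subs
    by_cases h : cur = "" <;> simp [h, pvSeg, pvFoldSave, pvSave]
  | cons l ls ih =>
    intro cur content subs
    simp only [List.foldl_cons]
    by_cases hl : pvIsHead l = true
    · have hl' : PySem.Str.startswith l "### " = true := hl
      simp only [pvStepA, hl', if_pos]
      rw [show (ls.foldl pvStepA
        ((if cur ≠ "" then subs.insert cur (PySem.Str.join "\n" content) else subs),
          PySem.Str.strip (PySem.Str.slice l (some 4) none), [])) = ls.foldl pvStepA
        ((if cur ≠ "" then subs.insert cur (PySem.Str.join "\n" content) else subs),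
          pvTitle l, []) from rfl]
      rw [ih]
      simp only [pvSeg, hl, ite_true]
      by_cases hc : cur = ""
      · by_cases ht : pvTitle l = "" <;> simp [hc, ht, pvFoldSave, pvSave]
      · by_cases ht : pvTitle l = "" <;> simp [hc, ht, pvFoldSave, pvSave]
    · have hl' : PySem.Str.startswith l "### " = false := by simpa using hl
      simp only [pvStepA, hl', Bool.false_eq_true, if_false]
      rw [ih]
      simp only [pvSeg, hl, Bool.false_eq_true, ite_false]
      by_cases hc : cur = "" <;> simp [hc]

lemma pvSeg_snd (ls : List String) : (pvSeg ls).2 = ls.takeWhile (fun l => !pvIsHead l) := by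
  induction ls with
  | nil => simp [pvSeg]
  | cons l ls ih =>
    simp only [pvSeg, List.takeWhile]
    by_cases h : pvIsHead l = true <;> simp [h, ih]

lemma pvHeads_cons (l : String) (ls : List String) (s : Int) :
    pvHeads (l :: ls) s = if pvIsHead l then (s, l) :: pvHeads ls (s + 1) else pvHeads ls (s + 1) := by
  by_cases h : pvIsHead l = true <;> simp [pvHeads, h]

lemma pvNexts_cons (h : Int × String) (t : List (Int × String)) (L : Int) :
    pvNexts (h :: t) L = (h, pvFirstOf t L) :: pvNexts t L := rfl

-- position lookup → structural next head
lemma pvB1 (f : (Int × String) → Int → String × List String) (heads : List (Int × String)) (L : Int) :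
    ∀ (hs : List (Int × String)) (j0 : Nat), heads.drop j0 = hs →
    (PySem.List.enumerate hs (j0 : Int)).map (fun p => f p.2 (pvStop heads L p.1))
    = (pvNexts hs L).map (fun q => f q.1 q.2) := by
  intro hs
  induction hs with
  | nil => intro j0 h; simp [PySem.List.enumerate, pvNexts]
  | cons h t ih =>
    intro j0 hd
    have hj0 : j0 < heads.length := by
      by_contra hge
      rw [List.drop_eq_nil_of_le (by omega)] at hd
      exact (List.cons_ne_nil _ _) hd.symm
    have hlen : heads.length = j0 + 1 + t.length := by
      have := congrArg List.length hd
      simp [List.length_drop] at this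
      omega
    have hdrop1 : heads.drop (j0 + 1) = t := by
      have : (heads.drop j0).drop 1 = heads.drop (j0 + 1) := by
        rw [List.drop_drop]
      rw [hd] at this
      simpa using this.symm
    rw [PySem.List.enumerate.eq_2]
    rw [show ((j0 : Int) + 1) = ((j0 + 1 : Nat) : Int) by push_cast; ring]
    rw [pvNexts]
    simp only [List.map_cons]
    rw [ih (j0 + 1) hdrop1]
    congr 1
    congr 1
    unfold pvStop
    cases t with
    | nil =>
      have hnc : ¬ ((j0 : Int) + 1 < PySem.List.len heads) := by
        simp only [PySem.List.len_eq, hlen, List.length_nil]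
        push_cast
        omega
      rw [if_neg hnc]
      simp [pvFirstOf]
    | cons h' t' =>
      have hc : ((j0 : Int) + 1 < PySem.List.len heads) := by
        simp only [PySem.List.len_eq, hlen, List.length_cons]
        push_cast
        omega
      rw [if_pos hc]
      rw [show ((j0 : Int) + 1) = ((j0 + 1 : Nat) : Int) by push_cast; ring]
      rw [PySem.List.pyGetD_natCast]
      have : heads[j0+1]? = some h' := by
        have h0 := congrArg (fun l => l[0]?) hdrop1
        simpa using h0
      simp [List.getD, this, pvFirstOf]

lemma pvFirstOf_heads (ls : List String) : ∀ (s : Nat),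
    pvFirstOf (pvHeads ls (s : Int)) ((s : Int) + ls.length)
    = ((s + (ls.takeWhile (fun l => !pvIsHead l)).length : Nat) : Int) := by
  induction ls with
  | nil => intro s; simp [pvHeads, PySem.List.enumerate, pvFirstOf]
  | cons l ls ih =>
    intro s
    rw [pvHeads_cons]
    by_cases h : pvIsHead l = true
    · rw [if_pos h, List.takeWhile_cons_of_neg (p := fun l => !pvIsHead l) (by simp [h])]
      simp [pvFirstOf]
    · have hb : pvIsHead l = false := by simpa using h
      rw [if_neg (by simp [hb])]
      rw [show ((s : Int) + 1) = ((s + 1 : Nat) : Int) by push_cast; ring]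
      rw [show ((s : Int) + (l :: ls).length) = ((s + 1 : Nat) : Int) + ls.length by push_cast; simp; ring]
      rw [ih (s + 1)]
      rw [List.takeWhile_cons_of_pos (by simp [hb])]
      push_cast
      simp
      ring

-- B's slice list equals the segments
lemma pvMainB (lines : List String) : ∀ (ls : List String) (s : Nat), lines.drop s = ls →
    (pvNexts (pvHeads ls (s : Int)) (PySem.List.len lines)).map
      (fun q => (pvTitle q.1.2, PySem.List.slice lines (some (q.1.1 + 1)) (some q.2)))
    = (pvSeg ls).1 := by
  intro ls
  induction ls with
  | nil => intro s hd; simp [pvHeads, PySem.List.enumerate, pvNexts, pvSeg]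
  | cons l ls ih =>
    intro s hd
    have hs : s < lines.length := by
      by_contra hge
      rw [List.drop_eq_nil_of_le (by omega)] at hd
      exact (List.cons_ne_nil _ _) hd.symm
    have hlen : lines.length = s + 1 + ls.length := by
      have := congrArg List.length hd
      simp [List.length_drop] at this
      omega
    have hdrop1 : lines.drop (s + 1) = ls := by
      have : (lines.drop s).drop 1 = lines.drop (s + 1) := by rw [List.drop_drop]
      rw [hd] at this
      simpa using this.symm
    rw [pvHeads_cons]
    by_cases h : pvIsHead l = true
    · rw [if_pos h]
      rw [show ((s : Int) + 1) = ((s + 1 : Nat) : Int) by push_cast; ring]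
      rw [pvNexts_cons, List.map_cons, ih (s + 1) hdrop1]
      simp only [pvSeg, h, ite_true]
      congr 1
      congr 1
      have hL : PySem.List.len lines = ((s + 1 : Nat) : Int) + ls.length := by
        simp [PySem.List.len_eq, hlen]
      rw [hL, pvFirstOf_heads ls (s + 1)]
      rw [show ((s : Int) + 1) = ((s + 1 : Nat) : Int) by push_cast; ring]
      rw [PySem.List.slice_natCast]
      rw [hdrop1, pvSeg_snd]
      have : s + 1 + (List.takeWhile (fun l => !pvIsHead l) ls).length - (s + 1)
          = (List.takeWhile (fun l => !pvIsHead l) ls).length := by omega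
      rw [this]
      exact pvTakeLen _ ls
    · rw [if_neg h]
      rw [show ((s : Int) + 1) = ((s + 1 : Nat) : Int) by push_cast; ring]
      rw [ih (s + 1) hdrop1]
      simp [pvSeg, h]

lemma pvStepB_eq (lines : List String) (heads : List (Int × String))
    (subs : PySem.Dict String String) (p : Int × Int × String) :
    pvStepB lines heads subs p
    = pvSave subs (pvTitle p.2.2)
        (PySem.List.slice lines (some (p.2.1 + 1)) (some (pvStop heads (PySem.List.len lines) p.1))) := by
  unfold pvStepB pvSave pvStop pvTitle
  by_cases ht : PySem.Str.strip (PySem.Str.slice p.2.2 (some 4) none) = "" <;> simp [ht]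

-- ===== VERDICT (by name: the statement is the Claim_ definition above) =====
theorem extract_subsections_spec : Claim_equal_extract_subsections := by
  intro s _
  unfold Spec_extract_subsections extract_subsections extract_subsections_alt
  simp only []
  set lines := (PySem.Str.split? s "\n").getD [] with hlines
  have hA := pvMainA lines "" [] PySem.Dict.empty
  simp only [ne_eq, not_true_eq_false, if_false, List.nil_append] at hA
  have hheads : ((PySem.List.enumerate lines).filter (fun p => PySem.Str.startswith p.2 "### "))
      = pvHeads lines 0 := rfl
  rw [hheads]
  have hstep : (pvStepB lines (pvHeads lines 0))
      = fun d p => pvSave d (pvTitle p.2.2)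
          (PySem.List.slice lines (some (p.2.1 + 1)) (some (pvStop (pvHeads lines 0) (PySem.List.len lines) p.1))) := by
    funext d p
    exact pvStepB_eq lines (pvHeads lines 0) d p
  rw [hstep]
  have hfoldmap : ((PySem.List.enumerate (pvHeads lines 0)).foldl
      (fun d p => pvSave d (pvTitle p.2.2)
        (PySem.List.slice lines (some (p.2.1 + 1)) (some (pvStop (pvHeads lines 0) (PySem.List.len lines) p.1))))
      PySem.Dict.empty)
      = pvFoldSave ((PySem.List.enumerate (pvHeads lines 0)).map
          (fun p => (pvTitle p.2.2,
            PySem.List.slice lines (some (p.2.1 + 1)) (some (pvStop (pvHeads lines 0) (PySem.List.len lines) p.1)))))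
          PySem.Dict.empty := by
    rw [pvFoldSave, List.foldl_map]
  rw [hfoldmap]
  have hB1 := pvB1 (fun e stop => (pvTitle e.2, PySem.List.slice lines (some (e.1 + 1)) (some stop)))
      (pvHeads lines 0) (PySem.List.len lines) (pvHeads lines 0) 0 List.drop_zero
  simp only [Nat.cast_zero] at hB1
  rw [hB1]
  have hB2 := pvMainB lines lines 0 List.drop_zero
  simp only [Nat.cast_zero] at hB2
  rw [hB2]
  rw [hA]
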